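-- pv_equiv track=rewrite | github.com/Iedi08/Mystic-bot-source-v6 | main.py | predict_safe_spots
-- ===== SOURCE A (Python) =====
-- def predict_safe_spots(game_data, safe_amount):
--     cell_counts = [0] * 25
--     for game in game_data:
--         mines = game['mineLocations']
--         for mine in mines:
--             cell_counts[mine] += 1
--     sorted_cells = sorted(range(len(cell_counts)), key=lambda k: cell_counts[k])
--     predicted_safe_spots = sorted_cells[:safe_amount]
--
--     return predicted_safe_spots
-- ===== SOURCE B (Python) =====
-- def predict_safe_spots(game_data, safe_amount):
--     cell_counts = [0] * 25
--     for game in game_data: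
--         for mine in game['mineLocations']:
--             cell_counts[mine] += 1
--     m = 0
--     for c in cell_counts:
--         if c > m:
--             m = c
--     buckets = [[] for _ in range(m + 1)]
--     for cell in range(25):
--         buckets[cell_counts[cell]].append(cell)
--     ordered = []
--     for b in buckets:
--         ordered.extend(b)
--     return ordered[:safe_amount]
-- ===== Notes on version B (the rewrite author's own statement) =====
-- stated objective: alternative
-- what changed: Replaces the comparison sort (sorted of range(25) keyed by counts) with a counting/bucket sort: counts are bucketed by frequency and the buckets concatenated from lowest to highest, which reproduces sorted's stable tie-break because cells are visited in ascending order.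
import Mathlib
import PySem

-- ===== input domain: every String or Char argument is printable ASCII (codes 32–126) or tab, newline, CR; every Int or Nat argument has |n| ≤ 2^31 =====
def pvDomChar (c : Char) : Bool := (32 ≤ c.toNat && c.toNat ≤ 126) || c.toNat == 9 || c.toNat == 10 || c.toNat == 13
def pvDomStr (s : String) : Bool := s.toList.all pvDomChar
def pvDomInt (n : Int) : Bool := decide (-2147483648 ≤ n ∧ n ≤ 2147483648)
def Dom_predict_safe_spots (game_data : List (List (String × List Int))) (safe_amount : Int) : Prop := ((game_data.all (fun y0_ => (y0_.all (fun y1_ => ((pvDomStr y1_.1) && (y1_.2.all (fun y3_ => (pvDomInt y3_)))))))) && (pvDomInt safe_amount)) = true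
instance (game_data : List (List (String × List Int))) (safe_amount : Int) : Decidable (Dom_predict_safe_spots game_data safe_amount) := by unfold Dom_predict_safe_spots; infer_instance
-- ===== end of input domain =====

-- B replaces A's comparison sort of the 25 cells by a counting/bucket sort over the
-- frequency values (same return value; no speed claim).

-- ===== PORT A =====
def predict_safe_spots (game_data : List (List (String × List Int))) (safe_amount : Int) : List Int :=
  let cell_counts : List Int :=
    game_data.foldl (fun cc game =>
      ((((PySem.Dict.mk game).get? "mineLocations").getD []).foldl
        (fun cc mine => PySem.List.pySetD cc mine (PySem.List.pyGetD cc mine 0 + 1)) cc))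
      (List.replicate 25 0)
  let sorted_cells :=
    PySem.List.sorted (PySem.List.pyRange 0 (cell_counts.length : Int) 1)
      (fun k => PySem.List.pyGetD cell_counts k 0) false
  PySem.List.slice sorted_cells none (some safe_amount)

-- ===== PORT B =====
def predict_safe_spots_alt (game_data : List (List (String × List Int))) (safe_amount : Int) : List Int :=
  let cell_counts : List Int :=
    game_data.foldl (fun cc game =>
      ((((PySem.Dict.mk game).get? "mineLocations").getD []).foldl
        (fun cc mine => PySem.List.pySetD cc mine (PySem.List.pyGetD cc mine 0 + 1)) cc))
      (List.replicate 25 0)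
  let m : Int := cell_counts.foldl (fun a c => if c > a then c else a) 0
  let buckets0 : List (List Int) := (List.range (m + 1).toNat).map (fun _ => [])
  let buckets := (PySem.List.pyRange 0 25 1).foldl
      (fun bk cell =>
        PySem.List.pySetD bk (PySem.List.pyGetD cell_counts cell 0)
          (PySem.List.pyGetD bk (PySem.List.pyGetD cell_counts cell 0) [] ++ [cell])) buckets0
  let ordered := buckets.foldl (fun acc b => acc ++ b) []
  PySem.List.slice ordered none (some safe_amount)

-- ===== PRECONDITION & SPEC =====
-- Pre_ excludes exactly the inputs where Python A raises: a game dict without the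
-- 'mineLocations' key (KeyError) or a mine index outside [-25, 24] (IndexError).
def Pre_predict_safe_spots (game_data : List (List (String × List Int))) (safe_amount : Int) : Prop :=
  game_data.all (fun game =>
    match (PySem.Dict.mk game).get? "mineLocations" with
    | none => false
    | some ml => ml.all (fun mine => decide (-25 ≤ mine ∧ mine < 25))) = true
instance (game_data : List (List (String × List Int))) (safe_amount : Int) : Decidable (Pre_predict_safe_spots game_data safe_amount) := by unfold Pre_predict_safe_spots; infer_instance

def pvWitness_predict_safe_spots : (List (List (String × List Int))) × Int :=
  ([[("mineLocations", [3, 3, -1])], [("mineLocations", [7])]], 5)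

def Spec_predict_safe_spots (game_data : List (List (String × List Int))) (safe_amount : Int) (out : List Int) : Prop := out = predict_safe_spots_alt game_data safe_amount
instance (game_data : List (List (String × List Int))) (safe_amount : Int) (out : List Int) : Decidable (Spec_predict_safe_spots game_data safe_amount out) := by unfold Spec_predict_safe_spots; infer_instance

-- ===== CLAIM (what is proved, stated in full; the proofs are below) =====
def Claim_equal_predict_safe_spots : Prop := ∀ (game_data : List (List (String × List Int))) (safe_amount : Int), Dom_predict_safe_spots game_data safe_amount → Pre_predict_safe_spots game_data safe_amount → Spec_predict_safe_spots game_data safe_amount (predict_safe_spots game_data safe_amount)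

-- ===== LEMMAS AND PROOFS =====

-- a value read by pyGet? is an element of the list
lemma mem_of_pyGet?_eq_some' {α : Type} {xs : List α} {i : Int} {y : α}
    (h : PySem.List.pyGet? xs i = some y) : y ∈ xs := by
  unfold PySem.List.pyGet? at h
  cases hk : PySem.List.pyIdx? xs.length i with
  | none => simp [hk] at h
  | some k =>
    simp only [hk, Option.bind_some] at h
    exact List.mem_of_getElem? h

-- membership after a Python-style set: each element is an old one or the new value
lemma mem_pySetD {α : Type} {x : α} {xs : List α} {i : Int} {v : α}
    (h : x ∈ PySem.List.pySetD xs i v) : x ∈ xs ∨ x = v := by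
  unfold PySem.List.pySetD PySem.List.pySet? at h
  cases hk : PySem.List.pyIdx? xs.length i with
  | none => simp [hk] at h; exact Or.inl h
  | some k =>
    simp only [hk, Option.map_some, Option.getD_some] at h
    exact List.mem_or_eq_of_mem_set h

-- one game's inner counting loop preserves length and nonnegativity
lemma counts_step_len (ms : List Int) : ∀ (cc : List Int),
    (ms.foldl (fun cc mine => PySem.List.pySetD cc mine (PySem.List.pyGetD cc mine 0 + 1)) cc).length
      = cc.length := by
  induction ms with
  | nil => intro cc; rfl
  | cons m t ih =>
    intro cc
    simp only [List.foldl_cons]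
    rw [ih]
    exact PySem.List.length_pySetD ..

lemma counts_step_nonneg (ms : List Int) : ∀ (cc : List Int), (∀ x ∈ cc, 0 ≤ x) →
    ∀ x ∈ ms.foldl (fun cc mine => PySem.List.pySetD cc mine (PySem.List.pyGetD cc mine 0 + 1)) cc, 0 ≤ x := by
  induction ms with
  | nil => intro cc h; simpa using h
  | cons m t ih =>
    intro cc h
    refine ih _ ?_
    intro x hx
    rcases mem_pySetD hx with hx' | hx'
    · exact h x hx'
    · subst hx'
      have hg : 0 ≤ PySem.List.pyGetD cc m 0 := by
        unfold PySem.List.pyGetD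
        cases hge : PySem.List.pyGet? cc m with
        | none => simp
        | some y => simpa using h y (mem_of_pyGet?_eq_some' hge)
      omega

-- the whole counting phase: length 25, all entries ≥ 0
lemma counts_len_aux (gd : List (List (String × List Int))) : ∀ (cc : List Int),
    (gd.foldl (fun cc game =>
      ((((PySem.Dict.mk game).get? "mineLocations").getD []).foldl
        (fun cc mine => PySem.List.pySetD cc mine (PySem.List.pyGetD cc mine 0 + 1)) cc)) cc).length
      = cc.length := by
  induction gd with
  | nil => intro cc; rfl
  | cons g t ih => intro cc; simp only [List.foldl_cons]; rw [ih, counts_step_len]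

lemma counts_nonneg_aux (gd : List (List (String × List Int))) : ∀ (cc : List Int), (∀ x ∈ cc, 0 ≤ x) →
    ∀ x ∈ gd.foldl (fun cc game =>
      ((((PySem.Dict.mk game).get? "mineLocations").getD []).foldl
        (fun cc mine => PySem.List.pySetD cc mine (PySem.List.pyGetD cc mine 0 + 1)) cc)) cc, 0 ≤ x := by
  induction gd with
  | nil => intro cc h; simpa using h
  | cons g t ih => intro cc h; exact ih _ (counts_step_nonneg _ _ h)

-- the running-maximum loop bounds every element (and stays ≥ its seed)
lemma foldl_max_ge (l : List Int) : ∀ (a : Int),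
    a ≤ l.foldl (fun a c => if c > a then c else a) a ∧
    ∀ x ∈ l, x ≤ l.foldl (fun a c => if c > a then c else a) a := by
  induction l with
  | nil => intro a; simp
  | cons c t ih =>
    intro a
    simp only [List.foldl_cons]
    by_cases h : c > a
    · rw [if_pos h]
      rcases ih c with ⟨h1, h2⟩
      refine ⟨by omega, ?_⟩
      intro x hx
      rcases List.mem_cons.mp hx with rfl | hx'
      · exact h1
      · exact h2 x hx'
    · rw [if_neg h]
      rcases ih a with ⟨h1, h2⟩
      refine ⟨h1, ?_⟩
      intro x hx
      rcases List.mem_cons.mp hx with rfl | hx'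
      · omega
      · exact h2 x hx'

-- insertion skips a prefix it does not go before
lemma insertBy_append_right {α : Type} (before : α → α → Bool) (x : α) :
    ∀ (as bs : List α), (∀ a ∈ as, before x a = false) →
    PySem.List.insertBy before x (as ++ bs) = as ++ PySem.List.insertBy before x bs := by
  intro as
  induction as with
  | nil => intro bs h; simp
  | cons a t ih =>
    intro bs h
    have ha : before x a = false := h a (by simp)
    simp only [List.cons_append, PySem.List.insertBy, ha, Bool.false_eq_true, if_false]
    rw [ih bs (fun a ha => h a (by simp [ha]))]

-- insertion goes to the very front when it goes before everything
lemma insertBy_of_forall_before {α : Type} (before : α → α → Bool) (x : α) :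
    ∀ (bs : List α), (∀ b ∈ bs, before x b = true) →
    PySem.List.insertBy before x bs = x :: bs := by
  intro bs h
  cases bs with
  | nil => rfl
  | cons b t => simp [PySem.List.insertBy, h b (List.mem_cons_self ..)]

-- the key of any member of a bucket concatenation is the bucket's value
lemma key_of_mem_buckets (key : Int → Int) (ys : List Int) (l : List Nat) {a : Int}
    (h : a ∈ l.flatMap (fun v : Nat => ys.filter (fun c => decide (key c = (v : Int))))) :
    ∃ v ∈ l, key a = (v : Int) := by
  rcases List.mem_flatMap.mp h with ⟨v, hv, ha⟩
  exact ⟨v, hv, of_decide_eq_true (List.mem_filter.mp ha).2⟩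

-- MAIN LEMMA 1: stable sort by a key with values in [0, M) = concatenation of the buckets
lemma stable_sort_eq_buckets (key : Int → Int) (M : Nat) :
    ∀ (ys : List Int), (∀ c ∈ ys, 0 ≤ key c ∧ key c < (M : Int)) →
    PySem.List.sorted ys key false
      = (List.range M).flatMap (fun v : Nat => ys.filter (fun c => decide (key c = (v : Int)))) := by
  intro ys
  induction ys using List.reverseRecOn with
  | nil => intro _; simp [PySem.List.sorted]
  | append_singleton ys x ih =>
    intro h
    have hys : ∀ c ∈ ys, 0 ≤ key c ∧ key c < (M : Int) := fun c hc => h c (by simp [hc])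
    have hx : 0 ≤ key x ∧ key x < (M : Int) := h x (by simp)
    set k : Nat := (key x).toNat with hk
    have hkx : key x = (k : Int) := by omega
    have hkM : k < M := by omega
    rw [PySem.List.sorted_eq_foldl_insertBy, List.foldl_append, List.foldl_cons, List.foldl_nil,
        ← PySem.List.sorted_eq_foldl_insertBy, ih hys]
    set F : Nat → List Int := fun v => ys.filter (fun c => decide (key c = (v : Int))) with hF
    set F' : Nat → List Int := fun v => (ys ++ [x]).filter (fun c => decide (key c = (v : Int))) with hF'
    have hFF' : ∀ v : Nat, F' v = F v ++ (if key x = (v : Int) then [x] else []) := by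
      intro v
      by_cases hxv : key x = (v : Int) <;> simp [hF, hF', List.filter_append, hxv]
    have hsplit : M = (k + 1) + (M - (k + 1)) := by omega
    rw [hsplit, List.range_add, List.flatMap_append, List.flatMap_append]
    set sh := List.map (fun j => (k + 1) + j) (List.range (M - (k + 1))) with hsh
    -- all buckets above k are unchanged
    have hright : sh.flatMap F' = sh.flatMap F := by
      rw [List.flatMap_def, List.flatMap_def]
      congr 1
      refine List.map_congr_left ?_
      intro v hv
      rcases List.mem_map.mp hv with ⟨j, _, rfl⟩
      rw [hFF', if_neg (by push_cast; omega), List.append_nil]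
    -- buckets up to k: only bucket k changes, gaining x at its end
    have hleft : (List.range (k + 1)).flatMap F' = (List.range k).flatMap F ++ (F k ++ [x]) := by
      rw [List.range_succ, List.flatMap_append]
      congr 1
      · rw [List.flatMap_def, List.flatMap_def]
        congr 1
        refine List.map_congr_left ?_
        intro v hv
        have hv' : v < k := List.mem_range.mp hv
        rw [hFF', if_neg (by omega), List.append_nil]
      · simp [hFF', hkx]
    have hasF : (List.range (k + 1)).flatMap F = (List.range k).flatMap F ++ F k := by
      rw [List.range_succ, List.flatMap_append]; simp
    -- the insertion lands exactly between the two parts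
    have hbefore_as : ∀ a ∈ (List.range (k + 1)).flatMap F,
        (decide (key x < key a)) = false := by
      intro a ha
      rcases key_of_mem_buckets key ys _ ha with ⟨v, hv, hkey⟩
      have : v < k + 1 := List.mem_range.mp hv
      simp only [decide_eq_false_iff_not, not_lt, hkey, hkx]
      exact_mod_cast Nat.le_of_lt_succ this
    have hbefore_bs : ∀ b ∈ sh.flatMap F, (decide (key x < key b)) = true := by
      intro b hb
      rcases key_of_mem_buckets key ys _ hb with ⟨v, hv, hkey⟩
      rcases List.mem_map.mp hv with ⟨j, _, rfl⟩
      simp only [decide_eq_true_iff, hkey, hkx]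
      push_cast; omega
    rw [insertBy_append_right (fun a b => decide (key a < key b)) x
          ((List.range (k + 1)).flatMap F) (sh.flatMap F) hbefore_as,
        insertBy_of_forall_before (fun a b => decide (key a < key b)) x (sh.flatMap F) hbefore_bs,
        hright, hleft, hasF]
    simp [List.append_assoc]

-- MAIN LEMMA 2: the bucket-filling loop builds exactly the filter buckets
lemma buckets_build (key : Int → Int) (M : Nat) :
    ∀ (cells : List Int) (B : List (List Int)), B.length = M →
    (∀ c ∈ cells, 0 ≤ key c ∧ key c < (M : Int)) →
    cells.foldl (fun bk c =>
        PySem.List.pySetD bk (key c) (PySem.List.pyGetD bk (key c) [] ++ [c])) B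
      = (List.range M).map (fun v : Nat =>
          PySem.List.pyGetD B (v : Int) [] ++ cells.filter (fun c => decide (key c = (v : Int)))) := by
  intro cells
  induction cells with
  | nil =>
    intro B hB _
    simp only [List.foldl_nil, List.filter_nil, List.append_nil]
    apply List.ext_getElem
    · simp [hB]
    · intro i h1 h2
      have hiM : i < M := by simpa using h2
      simp only [List.getElem_map, List.getElem_range, PySem.List.pyGetD_natCast]
      rw [List.getD_eq_getElem _ _ (by omega : i < B.length)]
  | cons c cells ih =>
    intro B hB h
    have hc : 0 ≤ key c ∧ key c < (M : Int) := h c (by simp)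
    have hcn : key c = (((key c).toNat : Nat) : Int) := by omega
    have hcnM : (key c).toNat < B.length := by omega
    simp only [List.foldl_cons]
    rw [ih _ (by rw [PySem.List.length_pySetD]; exact hB) (fun a ha => h a (by simp [ha]))]
    refine List.map_congr_left ?_
    intro v hv
    have hvM : v < M := List.mem_range.mp hv
    rw [hcn, PySem.List.pyGetD_pySetD_natCast _ _ _ _ _ hcnM, List.filter_cons]
    by_cases hvk : v = (key c).toNat
    · subst hvk
      rw [if_pos rfl, if_pos (by simp [← hcn])]
      simp [List.append_assoc]
    · rw [if_neg hvk, if_neg (by simp only [decide_eq_true_iff]; omega)]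

-- folding (++) over a list of lists is flattening
lemma foldl_append_id {α : Type} (l : List (List α)) : ∀ (acc : List α),
    l.foldl (fun acc b => acc ++ b) acc = acc ++ l.flatten := by
  induction l with
  | nil => intro acc; simp
  | cons b t ih => intro acc; simp [ih, List.append_assoc]

-- elements of range(0, n) lie in [0, n)
lemma pyRange_bounds (n : Int) : ∀ c ∈ PySem.List.pyRange 0 n 1, 0 ≤ c ∧ c < n := by
  intro c hc
  unfold PySem.List.pyRange at hc
  norm_num at hc
  rcases hc with ⟨k, hk, rfl⟩
  constructor
  · omega
  · split_ifs at hk with h <;> omega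

-- cells of range(25) have in-range nonnegative keys
lemma key_bounds (C : List Int) (hlen : C.length = 25) (hnn : ∀ x ∈ C, 0 ≤ x)
    (m : Int) (hmax : ∀ x ∈ C, x ≤ m) (hm0 : 0 ≤ m) :
    ∀ c ∈ PySem.List.pyRange 0 25 1,
      0 ≤ PySem.List.pyGetD C c 0 ∧ PySem.List.pyGetD C c 0 < (((m + 1).toNat : Nat) : Int) := by
  intro c hc
  have hcr : 0 ≤ c ∧ c < 25 := pyRange_bounds 25 c hc
  have hmem : PySem.List.pyGetD C c 0 ∈ C := by
    have hcn : c = ((c.toNat : Nat) : Int) := by omega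
    rw [hcn, PySem.List.pyGetD_natCast]
    have hlt : c.toNat < C.length := by omega
    rw [List.getD_eq_getElem _ _ hlt]
    exact List.getElem_mem hlt
  have h1 := hnn _ hmem
  have h2 := hmax _ hmem
  omega

-- the assembled equivalence, stated over an arbitrary counts list
lemma main_eq (C : List Int) (hlen : C.length = 25) (hnn : ∀ x ∈ C, 0 ≤ x) :
    PySem.List.sorted (PySem.List.pyRange 0 (C.length : Int) 1)
        (fun k => PySem.List.pyGetD C k 0) false
      = ((PySem.List.pyRange 0 25 1).foldl
          (fun bk cell =>
            PySem.List.pySetD bk (PySem.List.pyGetD C cell 0)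
              (PySem.List.pyGetD bk (PySem.List.pyGetD C cell 0) [] ++ [cell]))
          ((List.range (C.foldl (fun a c => if c > a then c else a) 0 + 1).toNat).map
            (fun _ => []))).foldl (fun acc b => acc ++ b) [] := by
  set m : Int := C.foldl (fun a c => if c > a then c else a) 0 with hm
  obtain ⟨hm0, hmax⟩ := foldl_max_ge C 0
  set M : Nat := (m + 1).toNat with hM
  have hkb := key_bounds C hlen hnn m hmax hm0
  have hA := stable_sort_eq_buckets (fun k => PySem.List.pyGetD C k 0) M
      (PySem.List.pyRange 0 25 1) hkb
  have hB := buckets_build (fun k => PySem.List.pyGetD C k 0) M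
      (PySem.List.pyRange 0 25 1) ((List.range M).map (fun _ => []))
      (by simp) hkb
  rw [hlen]
  have h25 : ((25 : Nat) : Int) = (25 : Int) := by norm_num
  rw [h25, hA, hB, foldl_append_id]
  simp only [List.nil_append]
  rw [List.flatMap_def]
  refine congrArg List.flatten (List.map_congr_left ?_)
  intro v hv
  have hvM : v < M := List.mem_range.mp hv
  rw [PySem.List.pyGetD_natCast]
  rw [List.getD_eq_getElem _ _ (by simpa using hvM)]
  simp

-- ===== VERDICT (by name: the statement is the Claim_ definition above) =====
theorem predict_safe_spots_spec : Claim_equal_predict_safe_spots := by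
  intro game_data safe_amount _hD _hP
  unfold Spec_predict_safe_spots predict_safe_spots predict_safe_spots_alt
  exact congrArg (fun l => PySem.List.slice l none (some safe_amount))
    (main_eq _ (by rw [counts_len_aux]; rfl)
      (counts_nonneg_aux game_data _ (fun x hx => by
        have := List.eq_of_mem_replicate hx; omega)))
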